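-- pv_equiv track=rewrite | github.com/needleful/godot | core/generate.py | make_version
-- ===== SOURCE A (Python) =====
-- def make_version(template, nargs, argmax, const, ret):
--     intext = template
--     from_pos = 0
--     outtext = ""
--
--     while True:
--         to_pos = intext.find("$", from_pos)
--         if to_pos == -1:
--             outtext += intext[from_pos:]
--             break
--         else:
--             outtext += intext[from_pos:to_pos]
--         end = intext.find("$", to_pos + 1)
--         if end == -1:
--             break  # ignore
--         macro = intext[to_pos + 1 : end]
--         cmd = ""
--         data = ""
--
--         if macro.find(" ") != -1:
--             cmd = macro[0 : macro.find(" ")]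
--             data = macro[macro.find(" ") + 1 :]
--         else:
--             cmd = macro
--
--         if cmd == "argc":
--             outtext += str(nargs)
--         if cmd == "ifret" and ret:
--             outtext += data
--         if cmd == "ifargs" and nargs:
--             outtext += data
--         if cmd == "ifretargs" and nargs and ret:
--             outtext += data
--         if cmd == "ifconst" and const:
--             outtext += data
--         elif cmd == "ifnoconst" and not const:
--             outtext += data
--         elif cmd == "ifnoret" and not ret:
--             outtext += data
--         elif cmd == "iftempl" and (nargs > 0 or ret):
--             outtext += data
--         elif cmd == "arg,":
--             for i in range(1, nargs + 1):
--                 if i > 1: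
--                     outtext += ", "
--                 outtext += data.replace("@", str(i))
--         elif cmd == "arg":
--             for i in range(1, nargs + 1):
--                 outtext += data.replace("@", str(i))
--         elif cmd == "noarg":
--             for i in range(nargs + 1, argmax + 1):
--                 outtext += data.replace("@", str(i))
--
--         from_pos = end + 1
--
--     return outtext
-- ===== SOURCE B (Python) =====
-- def _expand(macro, nargs, argmax, const, ret):
--     cmd, _, data = macro.partition(' ')
--     pieces = []
--     if cmd == 'argc':
--         pieces.append(str(nargs))
--     flags = {
--         'ifret': ret,
--         'ifargs': nargs != 0,
--         'ifretargs': nargs != 0 and ret,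
--         'ifconst': const,
--         'ifnoconst': not const,
--         'ifnoret': not ret,
--         'iftempl': nargs > 0 or ret,
--     }
--     if cmd in flags:
--         if flags[cmd]:
--             pieces.append(data)
--     elif cmd == 'arg,':
--         pieces.append(', '.join(data.replace('@', str(i)) for i in range(1, nargs + 1)))
--     elif cmd == 'arg':
--         pieces.append(''.join(data.replace('@', str(i)) for i in range(1, nargs + 1)))
--     elif cmd == 'noarg':
--         pieces.append(''.join(data.replace('@', str(i)) for i in range(nargs + 1, argmax + 1)))
--     return ''.join(pieces)
--
--
-- def make_version(template, nargs, argmax, const, ret):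
--     out = []
--     buf = None  # None = literal mode; a list of chars while inside a $...$ macro
--     for ch in template:
--         if ch == '$':
--             if buf is None:
--                 buf = []
--             else:
--                 out.append(_expand(''.join(buf), nargs, argmax, const, ret))
--                 buf = None
--         elif buf is None:
--             out.append(ch)
--         else:
--             buf.append(ch)
--     # an unclosed trailing macro (buf still open) is ignored, as in the original
--     return ''.join(out)
-- ===== Notes on version B (the rewrite author's own statement) =====
-- stated objective: alternative
-- what changed: B replaces A's two-cursor find()-and-slice scanning loop with a single character-at-a-time state machine (literal mode vs. macro-buffer mode) appending to a list joined at the end, and replaces A's if/elif keyword chain by a flag-dictionary dispatch with partition() for the cmd/data split.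
import Mathlib
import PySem

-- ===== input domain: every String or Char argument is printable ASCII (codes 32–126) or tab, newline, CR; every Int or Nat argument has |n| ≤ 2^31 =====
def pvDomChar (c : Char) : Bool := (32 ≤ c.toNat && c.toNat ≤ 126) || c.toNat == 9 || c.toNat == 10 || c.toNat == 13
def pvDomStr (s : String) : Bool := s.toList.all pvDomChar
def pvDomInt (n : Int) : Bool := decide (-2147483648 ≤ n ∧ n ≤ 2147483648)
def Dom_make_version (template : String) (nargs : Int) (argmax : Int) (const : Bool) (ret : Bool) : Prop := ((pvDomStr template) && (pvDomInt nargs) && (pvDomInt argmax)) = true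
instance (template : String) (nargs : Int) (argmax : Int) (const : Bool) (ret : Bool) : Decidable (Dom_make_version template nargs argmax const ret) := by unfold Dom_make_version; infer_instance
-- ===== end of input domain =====

-- B replaces A's two-cursor `find`-scanning loop by a single character-at-a-time state machine
-- (literal mode / macro-buffer mode) and A's if/elif keyword chain by a flag-dictionary dispatch;
-- objective: alternative (same O(n) cost, different decomposition).

-- ===== PORT A =====
-- A's `intext.find("$", from_pos)` is ported as `find` on the not-yet-consumed suffix of the
-- string (the loop never re-reads text before `from_pos`), which computes the same index
-- relative to that suffix; everything else is step for step A's code.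
-- termination facts for loopA (cited by its decreasing_by)
theorem slice_from_len_le (l : List Char) (t : Int) :
    (PySem.List.slice l (some t) none).length ≤ l.length := by
  simp [PySem.List.slice]

theorem slice_from_succ_len_le (l : List Char) (t : Int) (h : 0 ≤ t) :
    (PySem.List.slice l (some (t + 1)) none).length ≤ l.length - 1 := by
  rw [PySem.List.slice_from _ (by omega)]
  simp only [List.length_drop]
  omega

def expandA (nargs argmax : Int) (const ret : Bool) (mac : List Char) : List Char :=
  let p : List Char × List Char :=
    if PySem.Chars.find mac [' '] ≠ -1 then
      (PySem.List.slice mac none (some (PySem.Chars.find mac [' '])),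
       PySem.List.slice mac (some (PySem.Chars.find mac [' '] + 1)) none)
    else (mac, [])
  let cmd := p.1
  let data := p.2
  let o1 := if cmd = "argc".toList then PySem.Int.toChars nargs else []
  let o2 := if cmd = "ifret".toList ∧ ret then data else []
  let o3 := if cmd = "ifargs".toList ∧ nargs ≠ 0 then data else []
  let o4 := if cmd = "ifretargs".toList ∧ nargs ≠ 0 ∧ ret then data else []
  let o5 :=
    if cmd = "ifconst".toList ∧ const then data
    else if cmd = "ifnoconst".toList ∧ const = false then data
    else if cmd = "ifnoret".toList ∧ ret = false then data
    else if cmd = "iftempl".toList ∧ (0 < nargs ∨ ret) then data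
    else if cmd = "arg,".toList then
      (PySem.List.pyRange 1 (nargs + 1)).foldl (fun acc i =>
        (if 1 < i then acc ++ ", ".toList else acc) ++
          PySem.Chars.replace data ['@'] (PySem.Int.toChars i)) []
    else if cmd = "arg".toList then
      (PySem.List.pyRange 1 (nargs + 1)).foldl (fun acc i =>
        acc ++ PySem.Chars.replace data ['@'] (PySem.Int.toChars i)) []
    else if cmd = "noarg".toList then
      (PySem.List.pyRange (nargs + 1) (argmax + 1)).foldl (fun acc i =>
        acc ++ PySem.Chars.replace data ['@'] (PySem.Int.toChars i)) []
    else []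
  o1 ++ o2 ++ o3 ++ o4 ++ o5

def loopA (nargs argmax : Int) (const ret : Bool) (cs : List Char) : List Char :=
  if h : PySem.Chars.find cs ['$'] = -1 then cs
  else
    if PySem.Chars.find (PySem.List.slice cs (some (PySem.Chars.find cs ['$'] + 1)) none) ['$'] = -1 then
      PySem.List.slice cs none (some (PySem.Chars.find cs ['$']))
    else
      PySem.List.slice cs none (some (PySem.Chars.find cs ['$'])) ++
      expandA nargs argmax const ret
        (PySem.List.slice (PySem.List.slice cs (some (PySem.Chars.find cs ['$'] + 1)) none) none
          (some (PySem.Chars.find (PySem.List.slice cs (some (PySem.Chars.find cs ['$'] + 1)) none) ['$']))) ++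
      loopA nargs argmax const ret
        (PySem.List.slice (PySem.List.slice cs (some (PySem.Chars.find cs ['$'] + 1)) none)
          (some (PySem.Chars.find (PySem.List.slice cs (some (PySem.Chars.find cs ['$'] + 1)) none) ['$'] + 1)) none)
termination_by cs.length
decreasing_by
  have h1 : 0 ≤ PySem.Chars.find cs ['$'] := by
    have := PySem.Chars.neg_one_le_find cs ['$']; omega
  have hinf : ['$'] <:+: cs := by
    by_contra hc
    exact h ((PySem.Chars.find_eq_neg_one_iff cs ['$']).mpr hc)
  have hpos : 0 < cs.length := List.length_pos_of_mem ((List.singleton_infix_iff '$' cs).mp hinf)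
  have hb := slice_from_len_le
    (PySem.List.slice cs (some (PySem.Chars.find cs ['$'] + 1)) none)
    (PySem.Chars.find (PySem.List.slice cs (some (PySem.Chars.find cs ['$'] + 1)) none) ['$'] + 1)
  have hc := slice_from_succ_len_le cs (PySem.Chars.find cs ['$']) h1
  omega

def make_version (template : String) (nargs : Int) (argmax : Int) (const : Bool) (ret : Bool) : String :=
  String.mk (loopA nargs argmax const ret template.toList)

-- ===== PORT B =====
-- literal port of Source B: one pass over the characters with an optional macro buffer.
-- `macro.partition(' ')` (keeping pieces 1 and 3) is ported by hand as a split at the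
-- first space; exact: Python's partition splits at the first occurrence, third piece
-- empty when there is no space.
def partitionSp : List Char → List Char × List Char
  | [] => ([], [])
  | c :: rest =>
    if c = ' ' then ([], rest)
    else
      let p := partitionSp rest
      (c :: p.1, p.2)

def expandB (nargs argmax : Int) (const ret : Bool) (mac : List Char) : List Char :=
  let p := partitionSp mac
  let cmd := p.1
  let data := p.2
  let o1 := if cmd = "argc".toList then PySem.Int.toChars nargs else []
  let flags : PySem.Dict (List Char) Bool := PySem.Dict.mk
    [("ifret".toList, ret), ("ifargs".toList, decide (nargs ≠ 0)),
     ("ifretargs".toList, decide (nargs ≠ 0) && ret), ("ifconst".toList, const),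
     ("ifnoconst".toList, !const), ("ifnoret".toList, !ret),
     ("iftempl".toList, decide (0 < nargs) || ret)]
  let o2 :=
    match flags.get? cmd with
    | some b => if b then data else []
    | none =>
      if cmd = "arg,".toList then
        PySem.Chars.join ", ".toList
          ((PySem.List.pyRange 1 (nargs + 1)).map (fun i =>
            PySem.Chars.replace data ['@'] (PySem.Int.toChars i)))
      else if cmd = "arg".toList then
        PySem.Chars.join []
          ((PySem.List.pyRange 1 (nargs + 1)).map (fun i =>
            PySem.Chars.replace data ['@'] (PySem.Int.toChars i)))
      else if cmd = "noarg".toList then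
        PySem.Chars.join []
          ((PySem.List.pyRange (nargs + 1) (argmax + 1)).map (fun i =>
            PySem.Chars.replace data ['@'] (PySem.Int.toChars i)))
      else []
  o1 ++ o2

def runB (nargs argmax : Int) (const ret : Bool) : List Char → Option (List Char) → List Char
  | [], _ => []
  | c :: rest, none =>
    if c = '$' then runB nargs argmax const ret rest (some [])
    else c :: runB nargs argmax const ret rest none
  | c :: rest, some buf =>
    if c = '$' then expandB nargs argmax const ret buf ++ runB nargs argmax const ret rest none
    else runB nargs argmax const ret rest (some (buf ++ [c]))

def make_version_alt (template : String) (nargs : Int) (argmax : Int) (const : Bool) (ret : Bool) : String :=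
  String.mk (runB nargs argmax const ret template.toList none)

-- ===== PRECONDITION & SPEC =====
def Spec_make_version (template : String) (nargs : Int) (argmax : Int) (const : Bool) (ret : Bool) (out : String) : Prop := out = make_version_alt template nargs argmax const ret
instance (template : String) (nargs : Int) (argmax : Int) (const : Bool) (ret : Bool) (out : String) : Decidable (Spec_make_version template nargs argmax const ret out) := by unfold Spec_make_version; infer_instance

-- ===== CLAIM (what is proved, stated in full; the proofs are below) =====
def Claim_equal_make_version : Prop := ∀ (template : String) (nargs : Int) (argmax : Int) (const : Bool) (ret : Bool), Dom_make_version template nargs argmax const ret → Spec_make_version template nargs argmax const ret (make_version template nargs argmax const ret)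

-- ===== LEMMAS AND PROOFS =====

-- `find` on a single character, stated through the first-occurrence decomposition.
theorem find_single_of_not_mem (c : Char) (cs : List Char) (h : c ∉ cs) :
    PySem.Chars.find cs [c] = -1 :=
  (PySem.Chars.find_eq_neg_one_iff cs [c]).mpr
    (fun hinf => h ((List.singleton_infix_iff c cs).mp hinf))

theorem singleton_prefix_iff_head (c : Char) (l : List Char) :
    ([c] <+: l) ↔ l.head? = some c := by
  cases l with
  | nil => simp
  | cons x xs => simp [List.cons_prefix_cons, eq_comm]

theorem find_single_append (c : Char) (a b : List Char) (ha : c ∉ a) :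
    PySem.Chars.find (a ++ c :: b) [c] = (a.length : Int) := by
  have hmem : c ∈ a ++ c :: b := by simp
  have hinf : [c] <:+: a ++ c :: b := (List.singleton_infix_iff c _).mpr hmem
  have hne : PySem.Chars.find (a ++ c :: b) [c] ≠ -1 := by
    rw [Ne, PySem.Chars.find_eq_neg_one_iff]; exact not_not_intro hinf
  have h0 : 0 ≤ PySem.Chars.find (a ++ c :: b) [c] := by
    have := PySem.Chars.neg_one_le_find (a ++ c :: b) [c]; omega
  obtain ⟨hpre, hmin⟩ := PySem.Chars.find_spec h0
  have hub : PySem.Chars.find (a ++ c :: b) [c] ≤ (a.length : Int) := by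
    by_contra hgt
    push_neg at hgt
    exact hmin a.length (by omega) (by
      rw [List.drop_left]
      exact (singleton_prefix_iff_head c _).mpr rfl)
  have hlb : (a.length : Int) ≤ PySem.Chars.find (a ++ c :: b) [c] := by
    by_contra hgt
    push_neg at hgt
    have hk : (PySem.Chars.find (a ++ c :: b) [c]).toNat < a.length := by omega
    have hd : ((a ++ c :: b).drop (PySem.Chars.find (a ++ c :: b) [c]).toNat).head? = some c :=
      (singleton_prefix_iff_head c _).mp hpre
    rw [List.drop_append_of_le_length (by omega)] at hd
    have hne' : a.drop (PySem.Chars.find (a ++ c :: b) [c]).toNat ≠ [] := by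
      intro hnil
      have := List.drop_eq_nil_iff.mp hnil
      omega
    obtain ⟨x, xs, hxx⟩ := List.exists_cons_of_ne_nil hne'
    rw [hxx] at hd
    simp at hd
    have hxa : x ∈ a := List.mem_of_mem_drop (by rw [hxx]; exact List.mem_cons_self ..)
    rw [hd] at hxa
    exact ha hxa
  omega

theorem exists_first_split (c : Char) (cs : List Char) (h : c ∈ cs) :
    ∃ a b, cs = a ++ c :: b ∧ c ∉ a := by
  induction cs with
  | nil => cases h
  | cons x xs ih =>
    by_cases hx : x = c
    · exact ⟨[], xs, by simp [hx], by simp⟩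
    · have hmem : c ∈ xs := by
        cases h with
        | head => exact absurd rfl hx
        | tail _ h' => exact h'
      obtain ⟨a, b, hab, hna⟩ := ih hmem
      refine ⟨x :: a, b, by simp [hab], ?_⟩
      intro hc
      rcases List.mem_cons.mp hc with h' | h'
      · exact hx h'.symm
      · exact hna h'

-- partition(' ') agrees with A's find-based cmd/data split
theorem partitionSp_not_mem (m : List Char) (h : ' ' ∉ m) : partitionSp m = (m, []) := by
  induction m with
  | nil => rfl
  | cons c rest ih =>
    have hc : c ≠ ' ' := fun hc => h (by simp [hc])
    have : ' ' ∉ rest := fun hr => h (by simp [hr])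
    simp [partitionSp, hc, ih this]

theorem partitionSp_append (a b : List Char) (h : ' ' ∉ a) :
    partitionSp (a ++ ' ' :: b) = (a, b) := by
  induction a with
  | nil => simp [partitionSp]
  | cons c rest ih =>
    have hc : c ≠ ' ' := fun hc => h (by simp [hc])
    have : ' ' ∉ rest := fun hr => h (by simp [hr])
    simp [partitionSp, hc, ih this]

-- join lemmas for the comprehension/join forms in B
theorem join_nil_flatten (xs : List (List Char)) : PySem.Chars.join [] xs = xs.flatten := by
  induction xs with
  | nil => simp [PySem.Chars.join, List.intercalate]
  | cons x xs ih =>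
    cases xs with
    | nil => simp [PySem.Chars.join, List.intercalate]
    | cons y ys =>
      simp only [PySem.Chars.join, List.intercalate, List.intersperse] at *
      simp_all [List.flatten]

theorem join_cons_flat (sep x : List Char) (xs : List (List Char)) :
    PySem.Chars.join sep (x :: xs) = x ++ (xs.map (fun y => sep ++ y)).flatten := by
  induction xs generalizing x with
  | nil => simp [PySem.Chars.join, List.intercalate]
  | cons y ys ih =>
    have h1 : PySem.Chars.join sep (x :: y :: ys) = x ++ sep ++ PySem.Chars.join sep (y :: ys) := by
      simp [PySem.Chars.join, List.intercalate, List.intersperse]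
    rw [h1, ih y]
    simp

theorem foldl_plain_append (g : Int → List Char) (l : List Int) :
    ∀ acc : List Char, l.foldl (fun acc i => acc ++ g i) acc = acc ++ (l.map g).flatten := by
  induction l with
  | nil => simp
  | cons x xs ih => intro acc; simp [List.foldl_cons, ih]

theorem foldl_comma_append (g : Int → List Char) (sep : List Char) (l : List Int)
    (h : ∀ i ∈ l, 1 < i) :
    ∀ acc : List Char,
      l.foldl (fun acc i => (if 1 < i then acc ++ sep else acc) ++ g i) acc =
        acc ++ (l.map (fun i => sep ++ g i)).flatten := by
  induction l with
  | nil => simp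
  | cons x xs ih =>
    intro acc
    have hx : 1 < x := h x (by simp)
    simp only [List.foldl_cons, if_pos hx]
    rw [ih (fun i hi => h i (by simp [hi]))]
    simp

-- the arg-loop of A equals the join-of-map of B
theorem arg_comma_eq (data : List Char) (n : Int) :
    (PySem.List.pyRange 1 (n + 1)).foldl (fun acc i =>
        (if 1 < i then acc ++ ", ".toList else acc) ++
          PySem.Chars.replace data ['@'] (PySem.Int.toChars i)) [] =
      PySem.Chars.join ", ".toList
        ((PySem.List.pyRange 1 (n + 1)).map (fun i =>
          PySem.Chars.replace data ['@'] (PySem.Int.toChars i))) := by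
  by_cases hle : (n + 1 : Int) ≤ 1
  · rw [PySem.List.pyRange_one_eq_nil hle]
    simp [PySem.Chars.join, List.intercalate]
  · rw [PySem.List.pyRange_one_cons (by omega)]
    simp only [List.foldl_cons, List.map_cons]
    rw [join_cons_flat]
    have hm : ∀ i ∈ PySem.List.pyRange (1 + 1) (n + 1), 1 < i := by
      intro i hi
      have := PySem.List.mem_pyRange_one.mp hi
      omega
    rw [foldl_comma_append _ _ _ hm]
    simp [List.map_map]
    try rfl

theorem arg_plain_eq (data : List Char) (a b : Int) :
    (PySem.List.pyRange a b).foldl (fun acc i =>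
        acc ++ PySem.Chars.replace data ['@'] (PySem.Int.toChars i)) [] =
      PySem.Chars.join []
        ((PySem.List.pyRange a b).map (fun i =>
          PySem.Chars.replace data ['@'] (PySem.Int.toChars i))) := by
  rw [foldl_plain_append, join_nil_flatten]
  simp

-- the two macro expanders agree
theorem expand_eq (nargs argmax : Int) (const ret : Bool) (mac : List Char) :
    expandA nargs argmax const ret mac = expandB nargs argmax const ret mac := by
  -- first: both compute the same (cmd, data) pair
  have hsplit :
      (if PySem.Chars.find mac [' '] ≠ -1 then
        (PySem.List.slice mac none (some (PySem.Chars.find mac [' '])),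
         PySem.List.slice mac (some (PySem.Chars.find mac [' '] + 1)) none)
      else (mac, ([] : List Char))) = partitionSp mac := by
    by_cases hm : ' ' ∈ mac
    · obtain ⟨a, b, hab, hna⟩ := exists_first_split ' ' mac hm
      subst hab
      rw [find_single_append ' ' a b hna, partitionSp_append a b hna]
      have h1 : ((a.length : Int) ≠ -1) := by omega
      rw [if_pos h1, PySem.List.slice_to _ (by omega), PySem.List.slice_from _ (by omega)]
      have e1 : ((a.length : Int)).toNat = a.length := by omega
      have e2 : ((a.length : Int) + 1).toNat = a.length + 1 := by omega
      rw [e1, e2]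
      have d1 : List.take a.length (a ++ ' ' :: b) = a := List.take_left ..
      have d2 : List.drop (a.length + 1) (a ++ ' ' :: b) = b := by
        have : a ++ ' ' :: b = (a ++ [' ']) ++ b := by simp
        rw [this, List.drop_left' (by simp)]
      rw [d1, d2]
    · rw [find_single_of_not_mem ' ' mac hm, partitionSp_not_mem mac hm]
      simp
  obtain ⟨cmd, data, hp⟩ : ∃ c d, partitionSp mac = (c, d) := ⟨_, _, rfl⟩
  unfold expandA expandB
  rw [hsplit, hp]
  -- dispatch: case on cmd against each keyword, sequentially
  by_cases h1 : cmd = "argc".toList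
  · subst h1; simp [PySem.Dict.get?, PySem.Dict.get?_mk_cons]
  by_cases h2 : cmd = "ifret".toList
  · subst h2; simp [PySem.Dict.get?, PySem.Dict.get?_mk_cons]
  by_cases h3 : cmd = "ifargs".toList
  · subst h3; simp [PySem.Dict.get?, PySem.Dict.get?_mk_cons]
  by_cases h4 : cmd = "ifretargs".toList
  · subst h4; simp [PySem.Dict.get?, PySem.Dict.get?_mk_cons]
  by_cases h5 : cmd = "ifconst".toList
  · subst h5; simp [PySem.Dict.get?, PySem.Dict.get?_mk_cons]
  by_cases h6 : cmd = "ifnoconst".toList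
  · subst h6; simp [PySem.Dict.get?, PySem.Dict.get?_mk_cons]
  by_cases h7 : cmd = "ifnoret".toList
  · subst h7; simp [PySem.Dict.get?, PySem.Dict.get?_mk_cons]
  by_cases h8 : cmd = "iftempl".toList
  · subst h8; simp [PySem.Dict.get?, PySem.Dict.get?_mk_cons]
  by_cases h9 : cmd = "arg,".toList
  · subst h9
    simp [PySem.Dict.get?, PySem.Dict.get?_mk_cons]
    exact arg_comma_eq data nargs
  by_cases h10 : cmd = "arg".toList
  · subst h10; simp [PySem.Dict.get?, PySem.Dict.get?_mk_cons, arg_plain_eq, join_nil_flatten]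
  by_cases h11 : cmd = "noarg".toList
  · subst h11; simp [PySem.Dict.get?, PySem.Dict.get?_mk_cons, arg_plain_eq, join_nil_flatten]
  have h1' : cmd ≠ ['a', 'r', 'g', 'c'] := by intro he; exact h1 (he.trans (by decide))
  have h2' : cmd ≠ ['i', 'f', 'r', 'e', 't'] := by intro he; exact h2 (he.trans (by decide))
  have h3' : cmd ≠ ['i', 'f', 'a', 'r', 'g', 's'] := by intro he; exact h3 (he.trans (by decide))
  have h4' : cmd ≠ ['i', 'f', 'r', 'e', 't', 'a', 'r', 'g', 's'] := by intro he; exact h4 (he.trans (by decide))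
  have h5' : cmd ≠ ['i', 'f', 'c', 'o', 'n', 's', 't'] := by intro he; exact h5 (he.trans (by decide))
  have h6' : cmd ≠ ['i', 'f', 'n', 'o', 'c', 'o', 'n', 's', 't'] := by intro he; exact h6 (he.trans (by decide))
  have h7' : cmd ≠ ['i', 'f', 'n', 'o', 'r', 'e', 't'] := by intro he; exact h7 (he.trans (by decide))
  have h8' : cmd ≠ ['i', 'f', 't', 'e', 'm', 'p', 'l'] := by intro he; exact h8 (he.trans (by decide))
  have h9' : cmd ≠ ['a', 'r', 'g', ','] := by intro he; exact h9 (he.trans (by decide))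
  have h10' : cmd ≠ ['a', 'r', 'g'] := by intro he; exact h10 (he.trans (by decide))
  have h11' : cmd ≠ ['n', 'o', 'a', 'r', 'g'] := by intro he; exact h11 (he.trans (by decide))
  have hnil : (PySem.Dict.mk ([] : List (List Char × Bool))).get? cmd = none := rfl
  simp [PySem.Dict.get?_mk_cons, beq_iff_eq, hnil, h1', h2', h3', h4', h5', h6', h7', h8', h9', h10', h11',
    Ne.symm h2', Ne.symm h3', Ne.symm h4', Ne.symm h5', Ne.symm h6', Ne.symm h7', Ne.symm h8']

-- runB structure lemmas
theorem runB_lit (nargs argmax : Int) (const ret : Bool) (a : List Char) (h : '$' ∉ a) :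
    ∀ cs, runB nargs argmax const ret (a ++ cs) none = a ++ runB nargs argmax const ret cs none := by
  induction a with
  | nil => intro cs; simp
  | cons c rest ih =>
    intro cs
    have hc : c ≠ '$' := fun hc => h (by simp [hc])
    have hr : '$' ∉ rest := fun hr => h (by simp [hr])
    simp [runB, hc, ih hr]

theorem runB_mac_end (nargs argmax : Int) (const ret : Bool) (m : List Char) (h : '$' ∉ m) :
    ∀ buf, runB nargs argmax const ret m (some buf) = [] := by
  induction m with
  | nil => intro buf; simp [runB]
  | cons c rest ih =>
    intro buf
    have hc : c ≠ '$' := fun hc => h (by simp [hc])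
    have hr : '$' ∉ rest := fun hr => h (by simp [hr])
    simp [runB, hc, ih hr]

theorem runB_mac (nargs argmax : Int) (const ret : Bool) (m : List Char) (h : '$' ∉ m) :
    ∀ buf b, runB nargs argmax const ret (m ++ '$' :: b) (some buf) =
      expandB nargs argmax const ret (buf ++ m) ++ runB nargs argmax const ret b none := by
  induction m with
  | nil => intro buf b; simp [runB]
  | cons c rest ih =>
    intro buf b
    have hc : c ≠ '$' := fun hc => h (by simp [hc])
    have hr : '$' ∉ rest := fun hr => h (by simp [hr])
    simp only [List.cons_append, runB, if_neg hc]
    rw [ih hr (buf ++ [c]) b]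
    simp

-- main loop equivalence
theorem loopA_eq_runB (nargs argmax : Int) (const ret : Bool) :
    ∀ (k : Nat) (cs : List Char), cs.length ≤ k →
      loopA nargs argmax const ret cs = runB nargs argmax const ret cs none := by
  intro k
  induction k with
  | zero =>
    intro cs hcs
    have : cs = [] := List.eq_nil_of_length_eq_zero (by omega)
    subst this
    rw [loopA]
    simp [find_single_of_not_mem '$' [] (by simp), runB]
  | succ k ih =>
    intro cs hcs
    by_cases hm : '$' ∈ cs
    · obtain ⟨a, b, hab, hna⟩ := exists_first_split '$' cs hm
      subst hab
      have hfind : PySem.Chars.find (a ++ '$' :: b) ['$'] = (a.length : Int) :=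
        find_single_append '$' a b hna
      have hslice : PySem.List.slice (a ++ '$' :: b) (some (PySem.Chars.find (a ++ '$' :: b) ['$'] + 1)) none = b := by
        rw [hfind, PySem.List.slice_from _ (by omega)]
        have e2 : ((a.length : Int) + 1).toNat = a.length + 1 := by omega
        rw [e2]
        have : a ++ '$' :: b = (a ++ ['$']) ++ b := by simp
        rw [this, List.drop_left' (by simp)]
      have hpre : PySem.List.slice (a ++ '$' :: b) none (some (PySem.Chars.find (a ++ '$' :: b) ['$'])) = a := by
        rw [hfind, PySem.List.slice_to _ (by omega)]
        have e1 : ((a.length : Int)).toNat = a.length := by omega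
        rw [e1]
        exact List.take_left ..
      rw [loopA, dif_neg (by rw [hfind]; omega)]
      rw [runB_lit nargs argmax const ret a hna, hslice, hpre]
      simp only [runB, if_pos rfl]
      by_cases hb : '$' ∈ b
      · obtain ⟨m, b2, hb2, hnm⟩ := exists_first_split '$' b hb
        subst hb2
        have hfind2 : PySem.Chars.find (m ++ '$' :: b2) ['$'] = (m.length : Int) :=
          find_single_append '$' m b2 hnm
        rw [if_neg (by rw [hfind2]; omega)]
        have hmac : PySem.List.slice (m ++ '$' :: b2) none (some (PySem.Chars.find (m ++ '$' :: b2) ['$'])) = m := by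
          rw [hfind2, PySem.List.slice_to _ (by omega)]
          have e1 : ((m.length : Int)).toNat = m.length := by omega
          rw [e1]; exact List.take_left ..
        have hrest2 : PySem.List.slice (m ++ '$' :: b2) (some (PySem.Chars.find (m ++ '$' :: b2) ['$'] + 1)) none = b2 := by
          rw [hfind2, PySem.List.slice_from _ (by omega)]
          have e2 : ((m.length : Int) + 1).toNat = m.length + 1 := by omega
          rw [e2]
          have : m ++ '$' :: b2 = (m ++ ['$']) ++ b2 := by simp
          rw [this, List.drop_left' (by simp)]
        rw [hmac, hrest2]
        rw [runB_mac nargs argmax const ret m hnm [] b2]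
        rw [ih b2 (by simp at hcs; omega)]
        rw [expand_eq]
        simp
      · have hfind2 : PySem.Chars.find b ['$'] = -1 := find_single_of_not_mem '$' b hb
        rw [if_pos hfind2, runB_mac_end nargs argmax const ret b hb []]
        simp
    · have hfind : PySem.Chars.find cs ['$'] = -1 := find_single_of_not_mem '$' cs hm
      rw [loopA, dif_pos hfind]
      have := runB_lit nargs argmax const ret cs hm []
      simpa [runB] using this.symm

-- ===== VERDICT (by name: the statement is the Claim_ definition above) =====
theorem make_version_spec : Claim_equal_make_version := by
  intro template nargs argmax const ret _
  unfold Spec_make_version make_version make_version_alt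
  rw [loopA_eq_runB nargs argmax const ret template.toList.length template.toList le_rfl]
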